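-- pv_equiv track=rewrite | github.com/jennyzzt/LLM_debate_on_ARC | ARC_gen_agents2_rounds3_openai/b782dc8a/agent1/algo1.py | solve
-- ===== SOURCE A (Python) =====
-- def solve(input):
--     # Initialize the output grid with the same dimensions as the input grid
--     output = [[8 for _ in range(len(input[0]))] for _ in range(len(input))]
--
--     # Iterate through the input grid to find and transform numbers other than 8
--     for i in range(len(input)):
--         for j in range(len(input[0])):
--             # Directly copy the number if it's 8
--             if input[i][j] == 8:
--                 output[i][j] = 8
--             else:
--                 # Apply a transformation rule for numbers other than 8
--                 # This is a simplified example of how one might start to implement the transformation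
--                 # based on the observed patterns. It needs to be refined.
--                 num = input[i][j]
--                 if num == 0:
--                     output[i][j] = 0  # Assuming 0 remains unchanged
--                 elif num == 4:
--                     # Spread the 4 in some pattern, for example, to adjacent cells
--                     output[i][j] = 4
--                     if i > 0: output[i-1][j] = 3  # Example transformation
--                     if j > 0: output[i][j-1] = 2  # Example transformation
--                 elif num == 3:
--                     output[i][j] = 3  # Assuming 3 remains unchanged or follows a specific pattern
--                 # Additional transformation rules for 1 and 2 can be added here
--
--     return output
-- ===== SOURCE B (Python) =====
-- def solve(input):
--     # Closed-form, read-only reconstruction: A's row-major writes resolve so that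
--     # a 4 below wins (3), then a 4 to the right (2), else the cell's own base value.
--     h = len(input)
--     w = len(input[0]) if input else 0
--
--     def cell(i, j):
--         if i + 1 < h and input[i + 1][j] == 4:
--             return 3
--         if j + 1 < w and input[i][j + 1] == 4:
--             return 2
--         v = input[i][j]
--         return v if v in (0, 3, 4) else 8
--
--     return [[cell(i, j) for j in range(w)] for i in range(h)]
-- ===== Notes on version B (the rewrite author's own statement) =====
-- stated objective: alternative
-- what changed: Replaces A's imperative pass of collision-resolving writes into a mutable grid with a pure closed-form per-cell formula that only READS the input: output[i][j] = 3 if the cell below is 4, else 2 if the cell to the right is 4, else the base map of the cell itself; correctness rests on resolving A's row-major write order (3-from-below overwrites 2-from-right overwrites the own write) into read priorities.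
import Mathlib
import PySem

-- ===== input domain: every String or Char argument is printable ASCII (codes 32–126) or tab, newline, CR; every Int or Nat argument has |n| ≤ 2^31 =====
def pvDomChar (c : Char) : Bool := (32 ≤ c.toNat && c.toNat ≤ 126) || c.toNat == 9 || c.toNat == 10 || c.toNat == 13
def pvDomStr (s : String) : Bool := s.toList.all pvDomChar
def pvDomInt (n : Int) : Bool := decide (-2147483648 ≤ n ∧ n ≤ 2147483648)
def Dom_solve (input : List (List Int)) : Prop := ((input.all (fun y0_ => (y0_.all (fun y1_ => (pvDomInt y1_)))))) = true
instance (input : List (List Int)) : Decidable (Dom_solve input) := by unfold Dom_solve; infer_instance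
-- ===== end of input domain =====

-- B replaces A's imperative pass of collision-resolving writes by a pure closed-form
-- per-cell formula that only reads the input; same O(h*w) cost (objective: alternative).

-- `grid[a][b]` read (indices here are always nonnegative; in range on Pre_ inputs)
def pvGet2 (g : List (List Int)) (a b : Nat) : Int := (g.getD a []).getD b 0
-- `grid[a][b] = v` write (used by port A only)
def pvSet2 (g : List (List Int)) (a b : Nat) (v : Int) : List (List Int) :=
  g.modify a (fun r => r.set b v)

-- ===== PORT A =====
def solve (input : List (List Int)) : List (List Int) :=
  -- output = [[8 for _ in range(len(input[0]))] for _ in range(len(input))]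
  -- (len(input[0]) sits inside the comprehension: on input = [] it is never evaluated)
  let output := (List.range input.length).map
    (fun _ => (List.range (input.getD 0 []).length).map (fun _ => (8 : Int)))
  (List.range input.length).foldl (fun out i =>
    (List.range (input.getD 0 []).length).foldl (fun out j =>
      let v := pvGet2 input i j
      if v = 8 then pvSet2 out i j 8
      else if v = 0 then pvSet2 out i j 0
      else if v = 4 then
        let o1 := pvSet2 out i j 4
        let o2 := if 0 < i then pvSet2 o1 (i - 1) j 3 else o1
        if 0 < j then pvSet2 o2 i (j - 1) 2 else o2
      else if v = 3 then pvSet2 out i j 3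
      else out) out) output

-- ===== PORT B =====
-- Source B's base map: v if v in (0,3,4) else 8
def pvBase (v : Int) : Int := if v = 0 ∨ v = 3 ∨ v = 4 then v else 8

-- Source B's `cell(i, j)` helper
def pvCell (input : List (List Int)) (h w i j : Nat) : Int :=
  if i + 1 < h ∧ pvGet2 input (i + 1) j = 4 then 3
  else if j + 1 < w ∧ pvGet2 input i (j + 1) = 4 then 2
  else pvBase (pvGet2 input i j)

def solve_alt (input : List (List Int)) : List (List Int) :=
  let h := input.length
  let w := (input.getD 0 []).length
  (List.range h).map (fun i => (List.range w).map (fun j => pvCell input h w i j))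

-- ===== PRECONDITION & SPEC =====
-- Pre_ excludes exactly the ragged grids on which the Python A raises IndexError:
-- some row is shorter than the first row (input[i][j] with j < len(input[0]) fails).
def Pre_solve (input : List (List Int)) : Prop :=
  ∀ row ∈ input, (input.getD 0 []).length ≤ row.length
instance (input : List (List Int)) : Decidable (Pre_solve input) := by
  unfold Pre_solve; infer_instance

def pvWitness_solve : List (List Int) := [[4, 1], [0, 8]]

def Spec_solve (input : List (List Int)) (out : List (List Int)) : Prop := out = solve_alt input
instance (input : List (List Int)) (out : List (List Int)) : Decidable (Spec_solve input out) := by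
  unfold Spec_solve; infer_instance

-- ===== CLAIM (what is proved, stated in full; the proofs are below) =====
def Claim_equal_solve : Prop :=
  ∀ (input : List (List Int)), Dom_solve input → Pre_solve input → Spec_solve input (solve input)

-- ===== LEMMAS AND PROOFS =====

-- A's loop body as a named step function (definitionally the port's lambda)
def stepA (input out : List (List Int)) (i j : Nat) : List (List Int) :=
  let v := pvGet2 input i j
  if v = 8 then pvSet2 out i j 8
  else if v = 0 then pvSet2 out i j 0
  else if v = 4 then
    let o1 := pvSet2 out i j 4
    let o2 := if 0 < i then pvSet2 o1 (i - 1) j 3 else o1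
    if 0 < j then pvSet2 o2 i (j - 1) 2 else o2
  else if v = 3 then pvSet2 out i j 3
  else out

def pvShape (g : List (List Int)) (H W : Nat) : Prop :=
  g.length = H ∧ ∀ a, a < H → (g.getD a []).length = W

-- row-major order on cells
def rmLt (p q : Nat × Nat) : Prop := p.1 < q.1 ∨ (p.1 = q.1 ∧ p.2 < q.2)

-- the row-major cell list
def cells (H W : Nat) : List (Nat × Nat) :=
  (List.range H).flatMap (fun i => (List.range W).map (fun j => (i, j)))

-- the value cell (a,b) currently holds while the cells of L are still unprocessed:
-- the pending 3/2 writes from an unprocessed 4 below / to the right are masked,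
-- and an unprocessed cell itself still holds the initial 8
def curVal (input : List (List Int)) (H W : Nat) (L : List (Nat × Nat)) (a b : Nat) : Int :=
  if a + 1 < H ∧ (a + 1, b) ∉ L ∧ pvGet2 input (a + 1) b = 4 then 3
  else if b + 1 < W ∧ (a, b + 1) ∉ L ∧ pvGet2 input a (b + 1) = 4 then 2
  else if (a, b) ∉ L then pvBase (pvGet2 input a b)
  else 8

lemma pvGet2_set2_ne (g : List (List Int)) (a b x y : Nat) (v : Int)
    (h : x ≠ a ∨ y ≠ b) : pvGet2 (pvSet2 g a b v) x y = pvGet2 g x y := by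
  unfold pvGet2 pvSet2
  rcases h with h | h
  · rw [List.getD_eq_getElem?_getD, List.getD_eq_getElem?_getD (l := g)]
    simp [Ne.symm h]
  · rw [List.getD_eq_getElem?_getD (l := g.modify a fun r => r.set b v),
      List.getD_eq_getElem?_getD (l := g)]
    rw [List.getElem?_modify]
    cases hx : g[x]? with
    | none => rfl
    | some r =>
      simp only [Option.map_eq_map, Option.map_some, Option.getD_some]
      split_ifs with he
      · rw [List.getD_eq_getElem?_getD, List.getD_eq_getElem?_getD,
          List.getElem?_set_ne (Ne.symm h)]
      · rfl

lemma pvGet2_set2_eq (g : List (List Int)) (a b : Nat) (v : Int)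
    (ha : a < g.length) (hb : b < (g.getD a []).length) :
    pvGet2 (pvSet2 g a b v) a b = v := by
  unfold pvGet2 pvSet2
  rw [List.getD_eq_getElem?_getD]
  simp [List.getElem?_eq_getElem ha]
  have hb' : b < g[a].length := by rwa [List.getD_eq_getElem g (d := []) ha] at hb
  simp [List.getElem?_set_self (by simpa using hb')]

lemma pvShape_set2 (g : List (List Int)) (H W a b : Nat) (v : Int)
    (h : pvShape g H W) : pvShape (pvSet2 g a b v) H W := by
  obtain ⟨h1, h2⟩ := h
  refine ⟨by simp [pvSet2, h1], ?_⟩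
  intro a' ha'
  rw [List.getD_eq_getElem?_getD]
  rw [pvSet2, List.getElem?_modify]
  cases hx : g[a']? with
  | none => simp at hx; omega
  | some r =>
    have hr : r = g.getD a' [] := by rw [List.getD_eq_getElem?_getD, hx]; rfl
    simp only [Option.map_eq_map, Option.map_some, Option.getD_some]
    split_ifs
    all_goals simp only [List.length_set, hr]
    all_goals exact h2 a' ha'

lemma pvGet2_set2_eq' (g : List (List Int)) (H W a b : Nat) (v : Int)
    (hs : pvShape g H W) (ha : a < H) (hb : b < W) :
    pvGet2 (pvSet2 g a b v) a b = v := by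
  apply pvGet2_set2_eq
  · rw [hs.1]; exact ha
  · rw [hs.2 a ha]; exact hb

lemma grid_ext (gA gB : List (List Int)) (H W : Nat)
    (hA : pvShape gA H W) (hB : pvShape gB H W)
    (h : ∀ a b, a < H → b < W → pvGet2 gA a b = pvGet2 gB a b) : gA = gB := by
  obtain ⟨hA1, hA2⟩ := hA
  obtain ⟨hB1, hB2⟩ := hB
  apply List.ext_getElem (by omega)
  intro a h1 h2
  have haH : a < H := by omega
  apply List.ext_getElem
  · rw [← List.getD_eq_getElem gA (d := []) h1, ← List.getD_eq_getElem gB (d := []) h2,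
      hA2 a haH, hB2 a haH]
  · intro b hb1 hb2
    have hbW : b < W := by
      rw [← List.getD_eq_getElem gA (d := []) h1] at hb1
      rw [← hA2 a haH]; exact hb1
    have := h a b haH hbW
    unfold pvGet2 at this
    rw [List.getD_eq_getElem gA (d := []) h1, List.getD_eq_getElem gB (d := []) h2] at this
    rw [List.getD_eq_getElem _ (d := 0) hb1, List.getD_eq_getElem _ (d := 0) hb2] at this
    exact this

lemma pvShape_stepA (input g : List (List Int)) (H W i j : Nat)
    (h : pvShape g H W) : pvShape (stepA input g i j) H W := by
  simp only [stepA]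
  split_ifs <;> (repeat apply pvShape_set2) <;> exact h

-- effect of A's step on a cell other than (i,j): exactly the spread writes
lemma stepA_get_other (input g : List (List Int)) (H W i j a b : Nat)
    (hs : pvShape g H W) (hi : i < H) (hj : j < W) (ha : a < H) (hb : b < W)
    (hne : ¬(a = i ∧ b = j)) :
    pvGet2 (stepA input g i j) a b =
      if pvGet2 input i j = 4 ∧ 0 < j ∧ a = i ∧ b = j - 1 then 2
      else if pvGet2 input i j = 4 ∧ 0 < i ∧ a = i - 1 ∧ b = j then 3
      else pvGet2 g a b := by
  have s1 : pvShape (pvSet2 g i j 4) H W := pvShape_set2 _ _ _ _ _ _ hs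
  have s2 : pvShape (pvSet2 (pvSet2 g i j 4) (i - 1) j 3) H W := pvShape_set2 _ _ _ _ _ _ s1
  simp only [stepA]
  by_cases hc1 : pvGet2 input i j = 4 ∧ 0 < j ∧ a = i ∧ b = j - 1
  · rw [if_pos hc1]
    obtain ⟨h4, hj0, ha', hb'⟩ := hc1
    rw [ha', hb', if_neg (by omega), if_neg (by omega), if_pos h4, if_pos hj0]
    by_cases hi0 : 0 < i
    · rw [if_pos hi0, pvGet2_set2_eq' _ H W _ _ _ s2 hi (by omega)]
    · rw [if_neg hi0, pvGet2_set2_eq' _ H W _ _ _ s1 hi (by omega)]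
  · rw [if_neg hc1]
    by_cases hc2 : pvGet2 input i j = 4 ∧ 0 < i ∧ a = i - 1 ∧ b = j
    · rw [if_pos hc2]
      obtain ⟨h4, hi0, ha', hb'⟩ := hc2
      rw [ha', hb', if_neg (by omega), if_neg (by omega), if_pos h4, if_pos hi0]
      by_cases hj0 : 0 < j
      · rw [if_pos hj0, pvGet2_set2_ne _ i (j - 1) (i - 1) j 2 (by omega),
          pvGet2_set2_eq' _ H W _ _ _ s1 (by omega) hj]
      · rw [if_neg hj0, pvGet2_set2_eq' _ H W _ _ _ s1 (by omega) hj]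
    · rw [if_neg hc2]
      split_ifs with h8 h0 h4 hj0 hi0 hi1 h3
      · rw [pvGet2_set2_ne g i j a b 8 (by omega)]
      · rw [pvGet2_set2_ne g i j a b 0 (by omega)]
      · rw [pvGet2_set2_ne _ i (j - 1) a b 2 (by omega),
          pvGet2_set2_ne _ (i - 1) j a b 3 (by omega),
          pvGet2_set2_ne g i j a b 4 (by omega)]
      · rw [pvGet2_set2_ne _ i (j - 1) a b 2 (by omega),
          pvGet2_set2_ne g i j a b 4 (by omega)]
      · rw [pvGet2_set2_ne _ (i - 1) j a b 3 (by omega),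
          pvGet2_set2_ne g i j a b 4 (by omega)]
      · rw [pvGet2_set2_ne g i j a b 4 (by omega)]
      · rw [pvGet2_set2_ne g i j a b 3 (by omega)]
      · rfl

-- effect of A's step on (i,j) itself, when it still holds the initial 8
lemma stepA_get_self (input g : List (List Int)) (H W i j : Nat)
    (hs : pvShape g H W) (hi : i < H) (hj : j < W)
    (h8 : pvGet2 g i j = 8) :
    pvGet2 (stepA input g i j) i j = pvBase (pvGet2 input i j) := by
  have s1 : pvShape (pvSet2 g i j 4) H W := pvShape_set2 _ _ _ _ _ _ hs
  simp only [stepA, pvBase]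
  split_ifs <;> first
    | omega
    | (rw [pvGet2_set2_ne _ i (j - 1) i j 2 (by omega),
        pvGet2_set2_ne _ (i - 1) j i j 3 (by omega),
        pvGet2_set2_eq' _ H W _ _ _ hs hi hj] <;> omega)
    | (rw [pvGet2_set2_ne _ i (j - 1) i j 2 (by omega),
        pvGet2_set2_eq' _ H W _ _ _ hs hi hj] <;> omega)
    | (rw [pvGet2_set2_ne _ (i - 1) j i j 3 (by omega),
        pvGet2_set2_eq' _ H W _ _ _ hs hi hj] <;> omega)
    | (rw [pvGet2_set2_eq' _ H W _ _ _ hs hi hj] <;> omega)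

-- nested row/column fold = fold over the row-major cell list
lemma nested_foldl {α : Type} (f : α → Nat → Nat → α) (H W : Nat) (init : α) :
    (List.range H).foldl (fun acc i => (List.range W).foldl (fun acc j => f acc i j) acc) init
      = (cells H W).foldl (fun acc p => f acc p.1 p.2) init := by
  simp [cells, List.foldl_flatMap, List.foldl_map]

lemma mem_cells (H W : Nat) (p : Nat × Nat) : p ∈ cells H W ↔ p.1 < H ∧ p.2 < W := by
  cases p; simp [cells]

lemma pairwise_cells (H W : Nat) : List.Pairwise rmLt (cells H W) := by
  unfold cells
  rw [List.pairwise_flatMap]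
  refine ⟨?_, ?_⟩
  · intro i _
    rw [List.pairwise_map]
    exact List.pairwise_lt_range.imp (fun h => Or.inr ⟨rfl, h⟩)
  · apply List.pairwise_lt_range.imp
    intro i i' hlt p hp q hq
    simp only [List.mem_map, List.mem_range] at hp hq
    obtain ⟨jx, _, rfl⟩ := hp; obtain ⟨jy, _, rfl⟩ := hq
    exact Or.inl hlt

-- the main invariant induction: if every cell of g holds its curVal for the unprocessed
-- row-major-sorted, upward-closed list L, then after folding A's step over L every cell
-- holds its final closed-form value curVal [] = pvCell
lemma main_fold (input : List (List Int)) (H W : Nat) :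
    ∀ (L : List (Nat × Nat)) (g : List (List Int)),
      (∀ p ∈ L, p.1 < H ∧ p.2 < W) →
      List.Pairwise rmLt L →
      (∀ q ∈ L, ∀ r : Nat × Nat, r.1 < H → r.2 < W → rmLt q r → r ∈ L) →
      pvShape g H W →
      (∀ a b, a < H → b < W → pvGet2 g a b = curVal input H W L a b) →
      ∀ a b, a < H → b < W →
        pvGet2 (L.foldl (fun out p => stepA input out p.1 p.2) g) a b
          = curVal input H W [] a b := by
  intro L
  induction L with
  | nil => intro g _ _ _ _ hinv a b ha hb; exact hinv a b ha hb
  | cons p rest ih =>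
    intro g hmem hpw hcl hs hinv a b ha hb
    obtain ⟨i, j⟩ := p
    have hi : i < H := (hmem (i, j) (by simp)).1
    have hj : j < W := (hmem (i, j) (by simp)).2
    have hhd : ∀ q ∈ rest, rmLt (i, j) q := (List.pairwise_cons.mp hpw).1
    -- head is not in rest, and head's below/right neighbours are in the cons list if in bounds
    have hij_rest : (i, j) ∉ rest := by
      intro hm; have := hhd _ hm; simp [rmLt] at this
    have hg8 : pvGet2 g i j = 8 := by
      rw [hinv i j hi hj]
      unfold curVal
      have h1 : ¬ (i + 1 < H ∧ (i + 1, j) ∉ (i, j) :: rest ∧ pvGet2 input (i + 1) j = 4) :=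
        fun hc => hc.2.1 (hcl (i, j) (by simp) (i + 1, j) hc.1 hj (Or.inl (by omega)))
      have h2 : ¬ (j + 1 < W ∧ (i, j + 1) ∉ (i, j) :: rest ∧ pvGet2 input i (j + 1) = 4) :=
        fun hc => hc.2.1 (hcl (i, j) (by simp) (i, j + 1) hi hc.1 (Or.inr ⟨rfl, by omega⟩))
      have h3 : ¬ ((i, j) ∉ (i, j) :: rest) := fun hc => hc (by simp)
      rw [if_neg h1, if_neg h2, if_neg h3]
    simp only [List.foldl_cons]
    apply ih
    · exact fun q hq => hmem q (List.mem_cons_of_mem _ hq)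
    · exact (List.pairwise_cons.mp hpw).2
    · intro q hq r hr1 hr2 hlt
      have hrL : r ∈ (i, j) :: rest := hcl q (List.mem_cons_of_mem _ hq) r hr1 hr2 hlt
      rcases List.mem_cons.mp hrL with rfl | h
      · exfalso
        have h1 := hhd _ hq
        simp only [rmLt] at h1 hlt; omega
      · exact h
    · exact pvShape_stepA _ _ _ _ _ _ hs
    · intro a' b' ha' hb'
      by_cases hself : a' = i ∧ b' = j
      · obtain ⟨rfl, rfl⟩ := hself
        rw [stepA_get_self input g H W a' b' hs hi hj hg8]
        unfold curVal
        have h1 : ¬ (a' + 1 < H ∧ (a' + 1, b') ∉ rest ∧ pvGet2 input (a' + 1) b' = 4) := by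
          intro hc
          have hm : (a' + 1, b') ∈ (a', b') :: rest :=
            hcl (a', b') (by simp) (a' + 1, b') hc.1 hb' (Or.inl (by omega))
          rcases List.mem_cons.mp hm with h | h
          · exact absurd (congrArg Prod.fst h) (by simp)
          · exact hc.2.1 h
        have h2 : ¬ (b' + 1 < W ∧ (a', b' + 1) ∉ rest ∧ pvGet2 input a' (b' + 1) = 4) := by
          intro hc
          have hm : (a', b' + 1) ∈ (a', b') :: rest :=
            hcl (a', b') (by simp) (a', b' + 1) ha' hc.1 (Or.inr ⟨rfl, by omega⟩)
          rcases List.mem_cons.mp hm with h | h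
          · exact absurd (congrArg Prod.snd h) (by simp)
          · exact hc.2.1 h
        rw [if_neg h1, if_neg h2, if_pos hij_rest]
      · rw [stepA_get_other input g H W i j a' b' hs hi hj ha' hb' hself,
          hinv a' b' ha' hb']
        by_cases hw2 : pvGet2 input i j = 4 ∧ 0 < j ∧ a' = i ∧ b' = j - 1
        · obtain ⟨h4, hj0, hae, hbe⟩ := hw2
          rw [if_pos ⟨h4, hj0, hae, hbe⟩, hae, hbe]
          unfold curVal
          have h1 : ¬ (i + 1 < H ∧ (i + 1, j - 1) ∉ rest ∧ pvGet2 input (i + 1) (j - 1) = 4) := by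
            intro hc
            have hm : (i + 1, j - 1) ∈ (i, j) :: rest :=
              hcl (i, j) (by simp) (i + 1, j - 1) hc.1 (by omega) (Or.inl (by omega))
            rcases List.mem_cons.mp hm with h | h
            · exact absurd (congrArg Prod.fst h) (by simp)
            · exact hc.2.1 h
          have hjj : j - 1 + 1 = j := by omega
          rw [if_neg h1, if_pos (by rw [hjj]; exact ⟨hj, hij_rest, h4⟩)]
        · rw [if_neg hw2]
          by_cases hw3 : pvGet2 input i j = 4 ∧ 0 < i ∧ a' = i - 1 ∧ b' = j
          · obtain ⟨h4, hi0, hae, hbe⟩ := hw3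
            rw [if_pos ⟨h4, hi0, hae, hbe⟩, hae, hbe]
            unfold curVal
            have hii : i - 1 + 1 = i := by omega
            rw [if_pos (by rw [hii]; exact ⟨hi, hij_rest, h4⟩)]
          · rw [if_neg hw3]
            -- no write hit (a', b'); the membership tests agree between L and rest
            have e1 : (a' + 1 < H ∧ (a' + 1, b') ∉ (i, j) :: rest ∧ pvGet2 input (a' + 1) b' = 4)
                ↔ (a' + 1 < H ∧ (a' + 1, b') ∉ rest ∧ pvGet2 input (a' + 1) b' = 4) := by
              constructor
              · exact fun hc => ⟨hc.1, fun hm => hc.2.1 (List.mem_cons_of_mem _ hm), hc.2.2⟩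
              · intro hc
                refine ⟨hc.1, ?_, hc.2.2⟩
                intro hm
                rcases List.mem_cons.mp hm with h | h
                · have h1 : a' + 1 = i := congrArg Prod.fst h
                  have h2 : b' = j := congrArg Prod.snd h
                  exact hw3 ⟨by rw [← h1, ← h2]; exact hc.2.2, by omega, by omega, h2⟩
                · exact hc.2.1 h
            have e2 : (b' + 1 < W ∧ (a', b' + 1) ∉ (i, j) :: rest ∧ pvGet2 input a' (b' + 1) = 4)
                ↔ (b' + 1 < W ∧ (a', b' + 1) ∉ rest ∧ pvGet2 input a' (b' + 1) = 4) := by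
              constructor
              · exact fun hc => ⟨hc.1, fun hm => hc.2.1 (List.mem_cons_of_mem _ hm), hc.2.2⟩
              · intro hc
                refine ⟨hc.1, ?_, hc.2.2⟩
                intro hm
                rcases List.mem_cons.mp hm with h | h
                · have h1 : a' = i := congrArg Prod.fst h
                  have h2 : b' + 1 = j := congrArg Prod.snd h
                  exact hw2 ⟨by rw [← h1, ← h2]; exact hc.2.2, by omega, h1, by omega⟩
                · exact hc.2.1 h
            have e3 : ((a', b') ∉ (i, j) :: rest) ↔ ((a', b') ∉ rest) := by
              constructor
              · exact fun hc hm => hc (List.mem_cons_of_mem _ hm)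
              · intro hc hm
                rcases List.mem_cons.mp hm with h | h
                · exact hself ⟨congrArg Prod.fst h, congrArg Prod.snd h⟩
                · exact hc h
            unfold curVal
            simp only [e1, e2, e3]
    · exact ha
    · exact hb

-- shape and cell value of B's output grid
lemma alt_shape (input : List (List Int)) :
    pvShape (solve_alt input) input.length (input.getD 0 []).length := by
  constructor
  · simp [solve_alt]
  · intro a ha
    rw [solve_alt, List.getD_eq_getElem _ (d := []) (by simpa using ha)]
    simp

lemma alt_get (input : List (List Int)) (a b : Nat)
    (ha : a < input.length) (hb : b < (input.getD 0 []).length) :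
    pvGet2 (solve_alt input) a b
      = pvCell input input.length (input.getD 0 []).length a b := by
  unfold pvGet2 solve_alt
  rw [List.getD_eq_getElem _ (d := []) (by simpa using ha)]
  simp only [List.getElem_map]
  rw [List.getD_eq_getElem _ (d := 0) (by simpa using hb)]
  simp

lemma initA_shape (H W : Nat) :
    pvShape ((List.range H).map (fun _ => (List.range W).map (fun _ => (8 : Int)))) H W := by
  constructor
  · simp
  · intro a ha
    rw [List.getD_eq_getElem _ (d := []) (by simpa using ha)]
    simp

lemma initA_get (H W a b : Nat) (ha : a < H) (hb : b < W) :
    pvGet2 ((List.range H).map (fun _ => (List.range W).map (fun _ => (8 : Int)))) a b = 8 := by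
  unfold pvGet2
  rw [List.getD_eq_getElem _ (d := []) (by simpa using ha)]
  simp only [List.getElem_map]
  rw [List.getD_eq_getElem _ (d := 0) (by simpa using hb)]
  simp

lemma curVal_nil (input : List (List Int)) (H W a b : Nat) :
    curVal input H W [] a b = pvCell input H W a b := by
  simp [curVal, pvCell]

lemma curVal_cells (input : List (List Int)) (H W a b : Nat)
    (ha : a < H) (hb : b < W) : curVal input H W (cells H W) a b = 8 := by
  unfold curVal
  have h1 : ¬ (a + 1 < H ∧ (a + 1, b) ∉ cells H W ∧ pvGet2 input (a + 1) b = 4) :=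
    fun hc => hc.2.1 ((mem_cells H W (a + 1, b)).mpr ⟨hc.1, hb⟩)
  have h2 : ¬ (b + 1 < W ∧ (a, b + 1) ∉ cells H W ∧ pvGet2 input a (b + 1) = 4) :=
    fun hc => hc.2.1 ((mem_cells H W (a, b + 1)).mpr ⟨ha, hc.1⟩)
  have h3 : ¬ ((a, b) ∉ cells H W) := fun hc => hc ((mem_cells H W (a, b)).mpr ⟨ha, hb⟩)
  rw [if_neg h1, if_neg h2, if_neg h3]

lemma solve_eq_alt (input : List (List Int)) :
    solve input = solve_alt input := by
  have hA : solve input =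
      (cells input.length (input.getD 0 []).length).foldl
        (fun out p => stepA input out p.1 p.2)
        ((List.range input.length).map
          (fun _ => (List.range (input.getD 0 []).length).map (fun _ => (8 : Int)))) := by
    rw [← nested_foldl]; rfl
  have hshape : pvShape (solve input) input.length (input.getD 0 []).length := by
    rw [hA]
    have : ∀ (L : List (Nat × Nat)) g, pvShape g input.length (input.getD 0 []).length →
        pvShape (L.foldl (fun out p => stepA input out p.1 p.2) g)
          input.length (input.getD 0 []).length := by
      intro L
      induction L with
      | nil => intro g h; exact h
      | cons p rest ih =>
        intro g h
        exact ih _ (pvShape_stepA _ _ _ _ _ _ h)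
    exact this _ _ (initA_shape _ _)
  apply grid_ext _ _ input.length (input.getD 0 []).length hshape (alt_shape input)
  intro a b ha hb
  rw [alt_get input a b ha hb, hA, ← curVal_nil input input.length (input.getD 0 []).length a b]
  apply main_fold
  · intro p hp; exact (mem_cells _ _ p).mp hp
  · exact pairwise_cells _ _
  · intro q _ r hr1 hr2 _; exact (mem_cells _ _ r).mpr ⟨hr1, hr2⟩
  · exact initA_shape _ _
  · intro a' b' ha' hb'
    rw [initA_get _ _ a' b' ha' hb', curVal_cells _ _ _ _ _ ha' hb']
  · exact ha
  · exact hb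

-- ===== VERDICT (by name: the statement is the Claim_ definition above) =====
theorem solve_spec : Claim_equal_solve := by
  intro input _ _
  unfold Spec_solve
  exact solve_eq_alt input
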